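-- pv_equiv track=rewrite | github.com/soroosh-tanzadeh/rotary-insight | datasets/cwru_dataset.py | get_class_name
-- ===== SOURCE A (Python) =====
-- exps_idx = {"12DriveEndFault": 0, "48DriveEndFault": 0, "12FanEndFault": 0}
--
-- faults_idx = {
--     "Normal": 0,
--     "0.007-Ball": 1,
--     "0.014-Ball": 2,
--     "0.021-Ball": 3,
--     "0.007-InnerRace": 4,
--     "0.014-InnerRace": 5,
--     "0.021-InnerRace": 6,
--     "0.007-OuterRace3": 7,
--     "0.007-OuterRace6": 7,
--     "0.007-OuterRace12": 7,
--     "0.014-OuterRace3": 8,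
--     "0.014-OuterRace12": 8,
--     "0.014-OuterRace6": 8,
--     "0.021-OuterRace6": 9,
--     "0.021-OuterRace3": 9,
--     "0.021-OuterRace12": 9,
-- }
--
-- def get_class_name(label):
--     if label == 0:
--         return "Normal"
--     for fault in faults_idx:
--         if fault == 0:
--             continue
--         for exp in exps_idx:
--             if label == exps_idx[exp] + faults_idx[fault]:
--                 ## if fault name end with a number like OuterRace12, we need to remove the number
--                 return (
--                     exp
--                     + "_"
--                     + fault.replace("OuterRace3", "OuterRace")
--                     .replace("OuterRace6", "OuterRace")
--                     .replace("OuterRace12", "OuterRace")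
--                 )
--     return "Unknown"
-- ===== SOURCE B (Python) =====
-- # B: one flat precomputed table scanned with ==, replacing A's nested dict loops
-- # and runtime string .replace surgery.
-- CLASS_TABLE = [
--     (0, "Normal"),
--     (1, "12DriveEndFault_0.007-Ball"),
--     (2, "12DriveEndFault_0.014-Ball"),
--     (3, "12DriveEndFault_0.021-Ball"),
--     (4, "12DriveEndFault_0.007-InnerRace"),
--     (5, "12DriveEndFault_0.014-InnerRace"),
--     (6, "12DriveEndFault_0.021-InnerRace"),
--     (7, "12DriveEndFault_0.007-OuterRace"),
--     (8, "12DriveEndFault_0.014-OuterRace"),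
--     (9, "12DriveEndFault_0.021-OuterRace"),
-- ]
--
-- def get_class_name(label):
--     for key, name in CLASS_TABLE:
--         if label == key:
--             return name
--     return "Unknown"
-- ===== Notes on version B (the rewrite author's own statement) =====
-- stated objective: simpler
-- what changed: Replaces the nested loop over two dicts plus three runtime .replace calls with a single scan of one precomputed flat label->name table.
import Mathlib
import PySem

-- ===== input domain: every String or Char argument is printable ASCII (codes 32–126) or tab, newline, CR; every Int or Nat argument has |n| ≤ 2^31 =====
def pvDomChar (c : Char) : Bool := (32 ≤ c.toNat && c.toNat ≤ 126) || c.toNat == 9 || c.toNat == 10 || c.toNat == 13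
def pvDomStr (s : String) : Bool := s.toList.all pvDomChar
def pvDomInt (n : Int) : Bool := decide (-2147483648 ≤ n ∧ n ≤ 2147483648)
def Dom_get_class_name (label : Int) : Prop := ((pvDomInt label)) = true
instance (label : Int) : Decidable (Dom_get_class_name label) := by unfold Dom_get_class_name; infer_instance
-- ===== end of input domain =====

-- B replaces A's nested dict loops and runtime .replace cleanup with one flat
-- precomputed label->name table scanned with ==; objective: simpler.

-- ===== PORT A =====
-- the module-level dicts, as insertion-ordered association lists
def pyExpsIdx : List (String × Int) :=
  [("12DriveEndFault", 0), ("48DriveEndFault", 0), ("12FanEndFault", 0)]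

def pyFaultsIdx : List (String × Int) :=
  [("Normal", 0), ("0.007-Ball", 1), ("0.014-Ball", 2), ("0.021-Ball", 3),
   ("0.007-InnerRace", 4), ("0.014-InnerRace", 5), ("0.021-InnerRace", 6),
   ("0.007-OuterRace3", 7), ("0.007-OuterRace6", 7), ("0.007-OuterRace12", 7),
   ("0.014-OuterRace3", 8), ("0.014-OuterRace12", 8), ("0.014-OuterRace6", 8),
   ("0.021-OuterRace6", 9), ("0.021-OuterRace3", 9), ("0.021-OuterRace12", 9)]

-- fault.replace("OuterRace3","OuterRace").replace("OuterRace6","OuterRace").replace("OuterRace12","OuterRace")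
def pyCleanFault (fault : String) : String :=
  PySem.Str.replace (PySem.Str.replace (PySem.Str.replace fault "OuterRace3" "OuterRace")
    "OuterRace6" "OuterRace") "OuterRace12" "OuterRace"

-- inner 'for exp in exps_idx' loop with early return (keys with their dict values)
def pyInnerLoop (label : Int) (fault : String) (fidx : Int) : List (String × Int) → Option String
  | [] => none
  | (exp, eidx) :: rest =>
    if label = eidx + fidx then some (exp ++ "_" ++ pyCleanFault fault)
    else pyInnerLoop label fault fidx rest

-- outer 'for fault in faults_idx' loop; Python's 'if fault == 0: continue'
-- compares a string with 0 and is always False, so it never skips anything.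
def pyOuterLoop (label : Int) : List (String × Int) → String
  | [] => "Unknown"
  | (fault, fidx) :: rest =>
    match pyInnerLoop label fault fidx pyExpsIdx with
    | some s => s
    | none => pyOuterLoop label rest

def get_class_name (label : Int) : String :=
  if label = 0 then "Normal" else pyOuterLoop label pyFaultsIdx

-- ===== PORT B =====
def classTable : List (Int × String) :=
  [(0, "Normal"),
   (1, "12DriveEndFault_0.007-Ball"), (2, "12DriveEndFault_0.014-Ball"),
   (3, "12DriveEndFault_0.021-Ball"), (4, "12DriveEndFault_0.007-InnerRace"),
   (5, "12DriveEndFault_0.014-InnerRace"), (6, "12DriveEndFault_0.021-InnerRace"),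
   (7, "12DriveEndFault_0.007-OuterRace"), (8, "12DriveEndFault_0.014-OuterRace"),
   (9, "12DriveEndFault_0.021-OuterRace")]

def tableScan (label : Int) : List (Int × String) → String
  | [] => "Unknown"
  | (key, name) :: rest => if label = key then name else tableScan label rest

def get_class_name_alt (label : Int) : String := tableScan label classTable

-- ===== PRECONDITION & SPEC =====
def Spec_get_class_name (label : Int) (out : String) : Prop := out = get_class_name_alt label
instance (label : Int) (out : String) : Decidable (Spec_get_class_name label out) := by unfold Spec_get_class_name; infer_instance

-- ===== CLAIM (what is proved, stated in full; the proofs are below) =====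
def Claim_equal_get_class_name : Prop := ∀ (label : Int), Dom_get_class_name label → Spec_get_class_name label (get_class_name label)

-- ===== LEMMAS AND PROOFS =====
theorem inner_none (label : Int) (fault : String) (fidx : Int) (h : label ≠ fidx) :
    pyInnerLoop label fault fidx pyExpsIdx = none := by
  simp only [pyExpsIdx, pyInnerLoop]
  rw [if_neg (by omega), if_neg (by omega), if_neg (by omega)]

theorem outer_unknown (label : Int) (L : List (String × Int))
    (h : ∀ p ∈ L, label ≠ p.2) : pyOuterLoop label L = "Unknown" := by
  induction L with
  | nil => rfl
  | cons p rest ih =>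
    obtain ⟨fault, fidx⟩ := p
    unfold pyOuterLoop
    rw [inner_none label fault fidx (h _ (List.mem_cons_self ..))]
    exact ih fun q hq => h q (List.mem_cons_of_mem _ hq)

theorem scan_unknown (label : Int) (L : List (Int × String))
    (h : ∀ p ∈ L, label ≠ p.1) : tableScan label L = "Unknown" := by
  induction L with
  | nil => rfl
  | cons p rest ih =>
    obtain ⟨key, name⟩ := p
    unfold tableScan
    rw [if_neg (h _ (List.mem_cons_self ..))]
    exact ih fun q hq => h q (List.mem_cons_of_mem _ hq)

theorem get_class_name_eq (label : Int) : get_class_name label = get_class_name_alt label := by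
  by_cases h : 0 ≤ label ∧ label ≤ 9
  · obtain ⟨h1, h2⟩ := h
    interval_cases label <;> rfl
  · have hA : get_class_name label = "Unknown" := by
      unfold get_class_name
      rw [if_neg (by omega)]
      refine outer_unknown label _ ?_
      intro p hp
      simp only [pyFaultsIdx, List.mem_cons, List.not_mem_nil, or_false] at hp
      rcases hp with h' | h' | h' | h' | h' | h' | h' | h' | h' | h' | h' | h' | h' | h' | h' | h' <;>
        (subst h'; simp only []; omega)
    have hB : get_class_name_alt label = "Unknown" := by
      unfold get_class_name_alt
      refine scan_unknown label _ ?_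
      intro p hp
      simp only [classTable, List.mem_cons, List.not_mem_nil, or_false] at hp
      rcases hp with h' | h' | h' | h' | h' | h' | h' | h' | h' | h' <;>
        (subst h'; simp only []; omega)
    rw [hA, hB]

-- ===== VERDICT (by name: the statement is the Claim_ definition above) =====
theorem get_class_name_spec : Claim_equal_get_class_name := by
  intro label _
  unfold Spec_get_class_name
  exact get_class_name_eq label
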